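-- pv_equiv track=rewrite | github.com/mtrejo0/SchoolWork | 6.009/past/quiz1 March/q1_practice_solutions/q1_practice_b_sol.py | weave
-- ===== SOURCE A (Python) =====
-- def weave(list1, list2, last=None, result=None):
--     if result is None:
--         result = []
--     if list1 == [] and list2 == []:
--         return result
--     (source, other) = (list1, list2) if list1!=[] else (list2, list1)
--     while source != []:
--         next = source.pop(0)
--         if next != last:
--             result.append(next)
--             return weave(other, source, next, result)
--     return weave(other, source, last, result)
-- ===== SOURCE B (Python) =====
-- def weave(list1, list2, last=None, result=None):
--     # Iterative two-pointer pass (O(n)); does not mutate list1/list2 (A pops them);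
--     # appends into `result` in place when one is given, like A.
--     out = result if result is not None else []
--     i, j, s = 0, 0, 0
--     while i < len(list1) or j < len(list2):
--         if s == 0:
--             if i < len(list1):
--                 x = list1[i]
--                 i += 1
--                 if x != last:
--                     out.append(x)
--                     last = x
--                     s = 1
--             else:
--                 s = 1
--         else:
--             if j < len(list2):
--                 x = list2[j]
--                 j += 1
--                 if x != last:
--                     out.append(x)
--                     last = x
--                     s = 0
--             else:
--                 s = 0
--     return out
-- ===== Notes on version B (the rewrite author's own statement) =====
-- stated objective: faster
-- what changed: Replaced A's recursion-with-pop(0) (each pop shifts the whole list, plus one recursive call per element kept) by a single iterative two-pointer pass over the two lists with a turn flag, which also leaves list1/list2 unmutated.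
import Mathlib
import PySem

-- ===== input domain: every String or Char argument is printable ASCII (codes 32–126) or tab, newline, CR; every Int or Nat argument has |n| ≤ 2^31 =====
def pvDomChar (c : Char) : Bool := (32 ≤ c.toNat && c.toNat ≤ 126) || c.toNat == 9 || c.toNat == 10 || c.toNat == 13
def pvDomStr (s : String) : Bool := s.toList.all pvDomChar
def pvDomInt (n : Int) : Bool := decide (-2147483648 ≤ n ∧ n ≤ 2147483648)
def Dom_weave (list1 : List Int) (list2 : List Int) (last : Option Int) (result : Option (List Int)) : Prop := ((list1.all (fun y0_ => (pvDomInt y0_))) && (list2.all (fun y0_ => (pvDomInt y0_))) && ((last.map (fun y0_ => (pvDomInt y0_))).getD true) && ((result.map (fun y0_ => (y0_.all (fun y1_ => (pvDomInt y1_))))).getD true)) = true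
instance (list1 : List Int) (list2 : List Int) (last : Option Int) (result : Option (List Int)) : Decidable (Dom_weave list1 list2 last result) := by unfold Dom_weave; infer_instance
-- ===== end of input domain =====

-- B replaces A's pop(0)+recursion with one iterative two-pointer pass; equivalence is about
-- the RETURN value: A pops list1/list2 in place, B does not (both append into `result` in place).

-- ===== PORT A =====
-- `scanStep` is A's `while source != []` loop: pop(0) = take the head; it stops as soon as an
-- element ≠ last is popped and appended, returning (remaining source, last, result).
def scanStep : List Int → Option Int → List Int → List Int × Option Int × List Int
  | [], last, res => ([], last, res)
  | x :: rest, last, res => if some x ≠ last then (rest, some x, res ++ [x]) else scanStep rest last res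

-- A's recursion, with the call depth bounded by a fuel that `weave` supplies generously
-- (each recursive call consumes at least one list element, so the fuel is never exhausted);
-- both exits of the while loop are the recursive call weave(other, source, last', result').
def weaveGoA : Nat → List Int → List Int → Option Int → List Int → List Int
  | 0, _, _, _, res => res
  | n+1, l1, l2, last, res =>
    if l1 = [] ∧ l2 = [] then res
    else if l1 = [] then
      weaveGoA n l1 (scanStep l2 last res).1 (scanStep l2 last res).2.1 (scanStep l2 last res).2.2
    else
      weaveGoA n l2 (scanStep l1 last res).1 (scanStep l1 last res).2.1 (scanStep l1 last res).2.2

def weave (list1 : List Int) (list2 : List Int) (last : Option Int) (result : Option (List Int)) : List Int :=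
  weaveGoA (list1.length + list2.length + 1) list1 list2 last (result.getD [])

-- ===== PORT B =====
-- B's single while loop: indices i into list1 and j into list2, s = whose turn (0 or 1);
-- the fuel (one unit per loop iteration) is a totality guard that weave_alt supplies generously.
def weaveGoB : Nat → List Int → List Int → Nat → Nat → Nat → Option Int → List Int → List Int
  | 0, _, _, _, _, _, _, out => out
  | m+1, a, b, i, j, s, last, out =>
    if i < a.length ∨ j < b.length then
      if s = 0 then
        if i < a.length then
          if some (a.getD i 0) ≠ last then weaveGoB m a b (i+1) j 1 (some (a.getD i 0)) (out ++ [a.getD i 0])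
          else weaveGoB m a b (i+1) j 0 last out
        else weaveGoB m a b i j 1 last out
      else
        if j < b.length then
          if some (b.getD j 0) ≠ last then weaveGoB m a b i (j+1) 0 (some (b.getD j 0)) (out ++ [b.getD j 0])
          else weaveGoB m a b i (j+1) 1 last out
        else weaveGoB m a b i j 0 last out
    else out

def weave_alt (list1 : List Int) (list2 : List Int) (last : Option Int) (result : Option (List Int)) : List Int :=
  weaveGoB (2 * (list1.length + list2.length) + 2) list1 list2 0 0 0 last (result.getD [])

-- ===== PRECONDITION & SPEC =====
def Spec_weave (list1 : List Int) (list2 : List Int) (last : Option Int) (result : Option (List Int)) (out : List Int) : Prop := out = weave_alt list1 list2 last result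
instance (list1 : List Int) (list2 : List Int) (last : Option Int) (result : Option (List Int)) (out : List Int) : Decidable (Spec_weave list1 list2 last result out) := by unfold Spec_weave; infer_instance

-- ===== CLAIM (what is proved, stated in full; the proofs are below) =====
def Claim_equal_weave : Prop := ∀ (list1 : List Int) (list2 : List Int) (last : Option Int) (result : Option (List Int)), Dom_weave list1 list2 last result → Spec_weave list1 list2 last result (weave list1 list2 last result)

-- ===== LEMMAS AND PROOFS =====

lemma scanStep_cons (x : Int) (rest : List Int) (last : Option Int) (res : List Int) :
    scanStep (x :: rest) last res =
      if some x ≠ last then (rest, some x, res ++ [x]) else scanStep rest last res := rfl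

lemma scanStep_len_le (l : List Int) (last : Option Int) (res : List Int) :
    (scanStep l last res).1.length ≤ l.length := by
  induction l generalizing last res with
  | nil => simp [scanStep]
  | cons x rest ih =>
    rw [scanStep_cons]
    split_ifs
    · simp
    · exact le_trans (ih last res) (by simp)

lemma scanStep_len_lt (x : Int) (l : List Int) (last : Option Int) (res : List Int) :
    (scanStep (x :: l) last res).1.length < (x :: l).length := by
  rw [scanStep_cons]
  split_ifs
  · simp
  · exact lt_of_le_of_lt (scanStep_len_le l last res) (by simp)

lemma weaveGoA_nil_nil (n : Nat) (last : Option Int) (res : List Int) :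
    weaveGoA n [] [] last res = res := by
  cases n <;> simp [weaveGoA]

lemma weaveGoA_cons (n : Nat) (x : Int) (l1 l2 : List Int) (last : Option Int) (res : List Int) :
    weaveGoA (n+1) (x :: l1) l2 last res =
      weaveGoA n l2 (scanStep (x :: l1) last res).1 (scanStep (x :: l1) last res).2.1
        (scanStep (x :: l1) last res).2.2 := by
  simp [weaveGoA]

lemma weaveGoA_nil_cons (n : Nat) (y : Int) (l2 : List Int) (last : Option Int) (res : List Int) :
    weaveGoA (n+1) [] (y :: l2) last res =
      weaveGoA n [] (scanStep (y :: l2) last res).1 (scanStep (y :: l2) last res).2.1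
        (scanStep (y :: l2) last res).2.2 := by
  simp [weaveGoA]

lemma weaveGoA_fuel : ∀ (N : Nat) (l1 l2 : List Int) (last : Option Int) (res : List Int) (n n' : Nat),
    l1.length + l2.length ≤ N → N < n → N < n' →
    weaveGoA n l1 l2 last res = weaveGoA n' l1 l2 last res := by
  intro N
  induction N with
  | zero =>
    intro l1 l2 last res n n' h _ _
    obtain rfl : l1 = [] := by cases l1 <;> simp_all
    obtain rfl : l2 = [] := by cases l2 <;> simp_all
    rw [weaveGoA_nil_nil, weaveGoA_nil_nil]
  | succ N ih =>
    intro l1 l2 last res n n' h hn hn'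
    obtain ⟨n₁, rfl⟩ : ∃ k, n = k + 1 := ⟨n - 1, by omega⟩
    obtain ⟨n₁', rfl⟩ : ∃ k, n' = k + 1 := ⟨n' - 1, by omega⟩
    cases l1 with
    | nil =>
      cases l2 with
      | nil => rw [weaveGoA_nil_nil, weaveGoA_nil_nil]
      | cons y t =>
        rw [weaveGoA_nil_cons, weaveGoA_nil_cons]
        have hlt := scanStep_len_lt y t last res
        exact ih _ _ _ _ _ _ (by simp at h hlt ⊢; omega) (by omega) (by omega)
    | cons x l1' =>
      rw [weaveGoA_cons, weaveGoA_cons]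
      have hlt := scanStep_len_lt x l1' last res
      exact ih _ _ _ _ _ _ (by simp at h hlt ⊢; omega) (by omega) (by omega)

lemma weaveGoA_swap_nil (l : List Int) (last : Option Int) (res : List Int) (n n' : Nat)
    (hn : l.length < n) (hn' : l.length < n') :
    weaveGoA n [] l last res = weaveGoA n' l [] last res := by
  cases l with
  | nil => rw [weaveGoA_nil_nil, weaveGoA_nil_nil]
  | cons y t =>
    obtain ⟨n₁, rfl⟩ : ∃ k, n = k + 1 := ⟨n - 1, by omega⟩
    obtain ⟨n₁', rfl⟩ : ∃ k, n' = k + 1 := ⟨n' - 1, by omega⟩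
    rw [weaveGoA_nil_cons, weaveGoA_cons]
    have hlt := scanStep_len_lt y t last res
    exact weaveGoA_fuel ((scanStep (y :: t) last res).1.length) _ _ _ _ _ _
      (by simp) (by simp at hlt hn hn' ⊢; omega) (by simp at hlt hn hn' ⊢; omega)

lemma weaveGoA_skip (x : Int) (l1 l2 : List Int) (last : Option Int) (res : List Int)
    (hc : some x = last) (n n' : Nat)
    (hn : l1.length + l2.length + 1 < n) (hn' : l1.length + l2.length < n') :
    weaveGoA n (x :: l1) l2 last res = weaveGoA n' l1 l2 last res := by
  obtain ⟨n₁, rfl⟩ : ∃ k, n = k + 1 := ⟨n - 1, by omega⟩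
  rw [weaveGoA_cons, scanStep_cons, if_neg (not_not_intro hc)]
  cases l1 with
  | nil =>
    show weaveGoA n₁ l2 [] last res = weaveGoA n' [] l2 last res
    exact (weaveGoA_swap_nil l2 last res n' n₁ (by omega) (by omega)).symm
  | cons z t =>
    obtain ⟨n₁', rfl⟩ : ∃ k, n' = k + 1 := ⟨n' - 1, by omega⟩
    rw [weaveGoA_cons]
    have hlt := scanStep_len_lt z t last res
    exact weaveGoA_fuel (l2.length + (scanStep (z :: t) last res).1.length) _ _ _ _ _ _
      (by omega) (by simp at hlt hn hn' ⊢; omega) (by simp at hlt hn hn' ⊢; omega)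

lemma weaveGoA_skip_nil (y : Int) (l2 : List Int) (last : Option Int) (res : List Int)
    (hc : some y = last) (n n' : Nat)
    (hn : l2.length + 1 < n) (hn' : l2.length < n') :
    weaveGoA n [] (y :: l2) last res = weaveGoA n' [] l2 last res := by
  obtain ⟨n₁, rfl⟩ : ∃ k, n = k + 1 := ⟨n - 1, by omega⟩
  rw [weaveGoA_nil_cons, scanStep_cons, if_neg (not_not_intro hc)]
  cases l2 with
  | nil =>
    show weaveGoA n₁ [] [] last res = weaveGoA n' [] [] last res
    rw [weaveGoA_nil_nil, weaveGoA_nil_nil]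
  | cons z t =>
    obtain ⟨n₁', rfl⟩ : ∃ k, n' = k + 1 := ⟨n' - 1, by omega⟩
    rw [weaveGoA_nil_cons]
    have hlt := scanStep_len_lt z t last res
    exact weaveGoA_fuel ((scanStep (z :: t) last res).1.length) _ _ _ _ _ _
      (by simp) (by simp at hlt hn hn' ⊢; omega) (by simp at hlt hn hn' ⊢; omega)

lemma weaveGoB_done (m : Nat) (a b : List Int) (i j s : Nat) (last : Option Int) (out : List Int)
    (hi : ¬ i < a.length) (hj : ¬ j < b.length) : weaveGoB m a b i j s last out = out := by
  cases m <;> simp [weaveGoB, hi, hj]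

lemma weaveGoB_s0_take (m : Nat) (a b : List Int) (i j : Nat) (last : Option Int) (out : List Int)
    (hi : i < a.length) : weaveGoB (m+1) a b i j 0 last out =
      if some (a.getD i 0) ≠ last then weaveGoB m a b (i+1) j 1 (some (a.getD i 0)) (out ++ [a.getD i 0])
      else weaveGoB m a b (i+1) j 0 last out := by
  simp [weaveGoB, hi]

lemma weaveGoB_s0_switch (m : Nat) (a b : List Int) (i j : Nat) (last : Option Int) (out : List Int)
    (hi : ¬ i < a.length) (hj : j < b.length) :
    weaveGoB (m+1) a b i j 0 last out = weaveGoB m a b i j 1 last out := by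
  simp [weaveGoB, hi, hj]

lemma weaveGoB_s1_take (m : Nat) (a b : List Int) (i j : Nat) (last : Option Int) (out : List Int)
    (hj : j < b.length) : weaveGoB (m+1) a b i j 1 last out =
      if some (b.getD j 0) ≠ last then weaveGoB m a b i (j+1) 0 (some (b.getD j 0)) (out ++ [b.getD j 0])
      else weaveGoB m a b i (j+1) 1 last out := by
  simp [weaveGoB, hj]

lemma weaveGoB_s1_switch (m : Nat) (a b : List Int) (i j : Nat) (last : Option Int) (out : List Int)
    (hj : ¬ j < b.length) (hi : i < a.length) :
    weaveGoB (m+1) a b i j 1 last out = weaveGoB m a b i j 0 last out := by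
  simp [weaveGoB, hi, hj]

-- the loop invariant: A's pending lists are the unread suffixes of B's two arrays, in turn
-- order (s = 0: list1's suffix is A's first argument; s = 1: list2's is), with enough fuel.
lemma weave_key (a b : List Int) : ∀ (N i j : Nat) (last : Option Int) (res : List Int) (n m : Nat),
    (a.length - i) + (b.length - j) ≤ N → N < n → 2 * N + 1 ≤ m →
    (weaveGoA n (a.drop i) (b.drop j) last res = weaveGoB m a b i j 0 last res) ∧
    (weaveGoA n (b.drop j) (a.drop i) last res = weaveGoB m a b i j 1 last res) := by
  intro N
  induction N with
  | zero =>
    intro i j last res n m h _ _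
    have hi : ¬ i < a.length := by omega
    have hj : ¬ j < b.length := by omega
    rw [List.drop_eq_nil_of_le (by omega), List.drop_eq_nil_of_le (by omega)]
    constructor
    · rw [weaveGoA_nil_nil, weaveGoB_done m a b i j 0 last res hi hj]
    · rw [weaveGoA_nil_nil, weaveGoB_done m a b i j 1 last res hi hj]
  | succ N ih =>
    intro i j last res n m h hn hm
    obtain ⟨n₁, rfl⟩ : ∃ k, n = k + 1 := ⟨n - 1, by omega⟩
    obtain ⟨m₁, rfl⟩ : ∃ k, m = k + 1 := ⟨m - 1, by omega⟩
    have hdl : ∀ (l : List Int) (k : Nat), (l.drop k).length = l.length - k := fun l k => List.length_drop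
    constructor
    · -- s = 0
      by_cases hi : i < a.length
      · have hda : a.drop i = a[i] :: a.drop (i+1) := List.drop_eq_getElem_cons hi
        have hxa : a.getD i 0 = a[i] := List.getD_eq_getElem a 0 hi
        rw [weaveGoB_s0_take m₁ a b i j last res hi, hxa, hda]
        by_cases hc : some a[i] ≠ last
        · rw [if_pos hc, weaveGoA_cons, scanStep_cons, if_pos hc]
          exact (ih (i+1) j (some a[i]) (res ++ [a[i]]) n₁ m₁ (by omega) (by omega) (by omega)).2
        · rw [if_neg hc]
          rw [weaveGoA_skip a[i] (a.drop (i+1)) (b.drop j) last res (by simpa using hc) (n₁+1) (n₁+1)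
            (by rw [hdl, hdl]; omega) (by rw [hdl, hdl]; omega)]
          exact (ih (i+1) j last res (n₁+1) m₁ (by omega) (by omega) (by omega)).1
      · by_cases hj : j < b.length
        · have hda : a.drop i = [] := List.drop_eq_nil_of_le (by omega)
          have hdb : b.drop j = b[j] :: b.drop (j+1) := List.drop_eq_getElem_cons hj
          have hxb : b.getD j 0 = b[j] := List.getD_eq_getElem b 0 hj
          obtain ⟨m₂, rfl⟩ : ∃ k, m₁ = k + 1 := ⟨m₁ - 1, by omega⟩
          rw [weaveGoB_s0_switch (m₂+1) a b i j last res hi hj,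
            weaveGoB_s1_take m₂ a b i j last res hj, hxb, hda, hdb]
          by_cases hc : some b[j] ≠ last
          · rw [if_pos hc, weaveGoA_nil_cons, scanStep_cons, if_pos hc]
            have h2 := (ih i (j+1) (some b[j]) (res ++ [b[j]]) n₁ m₂ (by omega) (by omega) (by omega)).1
            rw [hda] at h2
            exact h2
          · rw [if_neg hc]
            rw [weaveGoA_skip_nil b[j] (b.drop (j+1)) last res (by simpa using hc) (n₁+1) (n₁+1)
              (by rw [hdl]; omega) (by rw [hdl]; omega)]
            have h2 := (ih i (j+1) last res (n₁+1) m₂ (by omega) (by omega) (by omega)).2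
            rw [hda] at h2
            rw [weaveGoA_swap_nil (b.drop (j+1)) last res (n₁+1) (n₁+1) (by rw [hdl]; omega)
              (by rw [hdl]; omega)]
            exact h2
        · rw [List.drop_eq_nil_of_le (by omega : a.length ≤ i),
            List.drop_eq_nil_of_le (by omega : b.length ≤ j), weaveGoA_nil_nil,
            weaveGoB_done (m₁+1) a b i j 0 last res hi hj]
    · -- s = 1
      by_cases hj : j < b.length
      · have hdb : b.drop j = b[j] :: b.drop (j+1) := List.drop_eq_getElem_cons hj
        have hxb : b.getD j 0 = b[j] := List.getD_eq_getElem b 0 hj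
        rw [weaveGoB_s1_take m₁ a b i j last res hj, hxb, hdb]
        by_cases hc : some b[j] ≠ last
        · rw [if_pos hc, weaveGoA_cons, scanStep_cons, if_pos hc]
          exact (ih i (j+1) (some b[j]) (res ++ [b[j]]) n₁ m₁ (by omega) (by omega) (by omega)).1
        · rw [if_neg hc]
          rw [weaveGoA_skip b[j] (b.drop (j+1)) (a.drop i) last res (by simpa using hc) (n₁+1) (n₁+1)
            (by rw [hdl, hdl]; omega) (by rw [hdl, hdl]; omega)]
          exact (ih i (j+1) last res (n₁+1) m₁ (by omega) (by omega) (by omega)).2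
      · by_cases hi : i < a.length
        · have hdb : b.drop j = [] := List.drop_eq_nil_of_le (by omega)
          have hda : a.drop i = a[i] :: a.drop (i+1) := List.drop_eq_getElem_cons hi
          have hxa : a.getD i 0 = a[i] := List.getD_eq_getElem a 0 hi
          obtain ⟨m₂, rfl⟩ : ∃ k, m₁ = k + 1 := ⟨m₁ - 1, by omega⟩
          rw [weaveGoB_s1_switch (m₂+1) a b i j last res hj hi,
            weaveGoB_s0_take m₂ a b i j last res hi, hxa, hdb, hda]
          by_cases hc : some a[i] ≠ last
          · rw [if_pos hc, weaveGoA_nil_cons, scanStep_cons, if_pos hc]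
            have h2 := (ih (i+1) j (some a[i]) (res ++ [a[i]]) n₁ m₂ (by omega) (by omega) (by omega)).2
            rw [hdb] at h2
            exact h2
          · rw [if_neg hc]
            rw [weaveGoA_skip_nil a[i] (a.drop (i+1)) last res (by simpa using hc) (n₁+1) (n₁+1)
              (by rw [hdl]; omega) (by rw [hdl]; omega)]
            have h2 := (ih (i+1) j last res (n₁+1) m₂ (by omega) (by omega) (by omega)).1
            rw [hdb] at h2
            rw [weaveGoA_swap_nil (a.drop (i+1)) last res (n₁+1) (n₁+1) (by rw [hdl]; omega)
              (by rw [hdl]; omega)]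
            exact h2
        · rw [List.drop_eq_nil_of_le (by omega : a.length ≤ i),
            List.drop_eq_nil_of_le (by omega : b.length ≤ j), weaveGoA_nil_nil,
            weaveGoB_done (m₁+1) a b i j 1 last res hi hj]

-- ===== VERDICT (by name: the statement is the Claim_ definition above) =====
theorem weave_spec : Claim_equal_weave := by
  intro list1 list2 last result _
  unfold Spec_weave weave weave_alt
  have h := (weave_key list1 list2 (list1.length + list2.length) 0 0 last (result.getD [])
    (list1.length + list2.length + 1) (2 * (list1.length + list2.length) + 2)
    (by omega) (by omega) (by omega)).1
  simpa using h
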